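-- pv_equiv track=rewrite | github.com/bruno-g-galvan/Facu | EXTRAS/3.4.225 - INTRODUCCIÓN A LA ALGORITMIA/Guias practicas resueltas/tpfunciones.py | extraerDigitoCentral
-- ===== SOURCE A (Python) =====
-- def extraerDigito(numero, posicion):
--     if numero<0:
--         numero*=-1
--     contador=0
--
--     while numero>0:
--
--         ultNumero=numero%10
--
--         if contador==posicion:
--             return ultNumero
--
--         numero=numero//10
--         contador+=1
--     return -1
--
-- def extraerDigitoCentral(num):
--     aux=num
--     if num<0:
--         num*=-1
--
--     cantDigitos=0
--
--     while num>0: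
--         num=num//10
--         cantDigitos+=1
--
--     if cantDigitos%2==0:
--         return -1
--     else:
--         mediana=cantDigitos//2
--         return extraerDigito(aux,mediana)
-- ===== SOURCE B (Python) =====
-- def extraerDigitoCentral(num):
--     n = -num if num < 0 else num
--     digits = []
--     while n > 0:
--         digits.append(n % 10)
--         n //= 10
--     m = len(digits)
--     return digits[m // 2] if m % 2 == 1 else -1
-- ===== Notes on version B (the rewrite author's own statement) =====
-- stated objective: simpler
-- what changed: Replaced A's two arithmetic while-loops (one counting digits, one re-extracting the digit at a counted position via a helper) by a single pass that collects the digit list once and directly indexes its middle element.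
import Mathlib
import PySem

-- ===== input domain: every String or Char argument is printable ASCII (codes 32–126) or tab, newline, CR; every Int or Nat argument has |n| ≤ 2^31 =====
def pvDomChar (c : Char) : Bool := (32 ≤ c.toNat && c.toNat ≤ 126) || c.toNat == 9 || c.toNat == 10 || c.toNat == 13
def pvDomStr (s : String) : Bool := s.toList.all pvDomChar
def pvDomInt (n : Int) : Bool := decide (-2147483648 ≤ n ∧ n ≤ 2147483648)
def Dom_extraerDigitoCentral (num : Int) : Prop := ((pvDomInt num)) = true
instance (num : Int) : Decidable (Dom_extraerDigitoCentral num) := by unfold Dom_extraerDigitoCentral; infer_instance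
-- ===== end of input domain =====

-- B replaces A's two digit-counting/extracting while-loops (plus helper with a position counter)
-- by a single pass that collects the digit list once and indexes its middle element (objective: simpler).

-- ===== PORT A =====
-- the while-loop of extraerDigito: state (numero, contador), parameter posicion
def extraerDigitoLoop (numero contador posicion : Int) : Int :=
  if numero > 0 then
    let ultNumero := PySem.Int.mod numero 10
    if contador == posicion then ultNumero
    else extraerDigitoLoop (PySem.Int.floordiv numero 10) (contador + 1) posicion
  else -1
termination_by numero.toNat
decreasing_by
  rw [PySem.Int.floordiv_eq_ediv_of_pos (by omega)]
  have h1 : numero / 10 < numero := Int.ediv_lt_of_lt_mul (by omega) (by omega)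
  have h2 : 0 ≤ numero / 10 := Int.ediv_nonneg (by omega) (by omega)
  omega

def extraerDigito (numero posicion : Int) : Int :=
  let numero := if numero < 0 then numero * (-1) else numero
  extraerDigitoLoop numero 0 posicion

-- the digit-counting while-loop of extraerDigitoCentral
def cantDigitosLoop (num : Int) : Int :=
  if num > 0 then cantDigitosLoop (PySem.Int.floordiv num 10) + 1 else 0
termination_by num.toNat
decreasing_by
  rename_i h
  rw [PySem.Int.floordiv_eq_ediv_of_pos (by omega)]
  have h1 : num / 10 < num := Int.ediv_lt_of_lt_mul (by omega) (by omega)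
  have h2 : 0 ≤ num / 10 := Int.ediv_nonneg (by omega) (by omega)
  omega

def extraerDigitoCentral (num : Int) : Int :=
  let aux := num
  let num := if num < 0 then num * (-1) else num
  let cantDigitos := cantDigitosLoop num
  if PySem.Int.mod cantDigitos 2 == 0 then -1
  else
    let mediana := PySem.Int.floordiv cantDigitos 2
    extraerDigito aux mediana

-- ===== PORT B =====
-- Source B's single while-loop collecting digits least-significant-first
def digitsLoop (n : Int) : List Int :=
  if n > 0 then PySem.Int.mod n 10 :: digitsLoop (PySem.Int.floordiv n 10) else []
termination_by n.toNat
decreasing_by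
  rename_i h
  rw [PySem.Int.floordiv_eq_ediv_of_pos (by omega)]
  have h1 : n / 10 < n := Int.ediv_lt_of_lt_mul (by omega) (by omega)
  have h2 : 0 ≤ n / 10 := Int.ediv_nonneg (by omega) (by omega)
  omega

def extraerDigitoCentral_alt (num : Int) : Int :=
  let n := if num < 0 then -num else num
  let digits := digitsLoop n
  let m : Int := (digits.length : Int)
  if PySem.Int.mod m 2 == 1 then
    -- digits[m // 2]; the index is always in range when the branch is taken
    PySem.List.pyGetD digits (PySem.Int.floordiv m 2) 0
  else -1

-- ===== PRECONDITION & SPEC =====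
def Spec_extraerDigitoCentral (num : Int) (out : Int) : Prop := out = extraerDigitoCentral_alt num
instance (num : Int) (out : Int) : Decidable (Spec_extraerDigitoCentral num out) := by unfold Spec_extraerDigitoCentral; infer_instance

-- ===== CLAIM (what is proved, stated in full; the proofs are below) =====
def Claim_equal_extraerDigitoCentral : Prop := ∀ (num : Int), Dom_extraerDigitoCentral num → Spec_extraerDigitoCentral num (extraerDigitoCentral num)

-- ===== LEMMAS AND PROOFS =====

theorem cant_eq_length (n : Int) : cantDigitosLoop n = ((digitsLoop n).length : Int) := by
  induction n using digitsLoop.induct with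
  | case1 n h ih =>
    rw [cantDigitosLoop, digitsLoop, if_pos h, if_pos h]
    rw [ih]
    simp only [List.length_cons]
    push_cast
    ring
  | case2 n h =>
    rw [cantDigitosLoop, digitsLoop, if_neg h, if_neg h]
    rfl

theorem extract_eq_getD (n : Int) (c : Int) (k : Nat) :
    extraerDigitoLoop n c (c + (k : Int)) = (digitsLoop n).getD k (-1) := by
  induction n using digitsLoop.induct generalizing c k with
  | case1 n h ih =>
    rw [extraerDigitoLoop, digitsLoop, if_pos h, if_pos h]
    by_cases hk : k = 0
    · subst hk; simp
    · have hne : (c == c + (k : Int)) = false := by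
        simp only [beq_eq_false_iff_ne, ne_eq]
        omega
      simp only [hne, Bool.false_eq_true, if_false]
      obtain ⟨k', rfl⟩ : ∃ k', k = k' + 1 := ⟨k - 1, by omega⟩
      have : c + ((k' : Int) + 1) = (c + 1) + (k' : Int) := by ring
      rw [show c + (((k' + 1 : Nat) : Int)) = (c + 1) + (k' : Int) by push_cast; ring]
      rw [ih]
      simp [List.getD]
  | case2 n h =>
    rw [extraerDigitoLoop, digitsLoop, if_neg h, if_neg h]
    simp [List.getD]

-- ===== VERDICT (by name: the statement is the Claim_ definition above) =====
theorem extraerDigitoCentral_spec : Claim_equal_extraerDigitoCentral := by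
  intro num _
  unfold Spec_extraerDigitoCentral extraerDigitoCentral extraerDigitoCentral_alt extraerDigito
  have habs : (if num < 0 then num * (-1) else num) = (if num < 0 then -num else num) := by
    split <;> ring
  rw [habs]
  set n := if num < 0 then -num else num with hn
  simp only [cant_eq_length]
  set m : Nat := (digitsLoop n).length with hm
  have hmod : PySem.Int.mod (m : Int) 2 = ((m % 2 : Nat) : Int) := by
    exact_mod_cast PySem.Int.mod_natCast m 2
  have hdiv : PySem.Int.floordiv (m : Int) 2 = ((m / 2 : Nat) : Int) := by
    exact_mod_cast PySem.Int.floordiv_natCast m 2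
  rw [hmod, hdiv]
  by_cases hpar : m % 2 = 0
  · simp [hpar]
  · have h1 : ((((m % 2 : Nat)) : Int) == 0) = false := by
      simp only [beq_eq_false_iff_ne, ne_eq]
      omega
    have h2 : ((((m % 2 : Nat)) : Int) == 1) = true := by
      simp only [beq_iff_eq]
      omega
    simp only [h1, h2, Bool.false_eq_true, if_false, if_true]
    have habs2 : (if num < 0 then num * (-1) else num) = n := habs
    rw [habs2]
    have := extract_eq_getD n 0 (m / 2)
    rw [zero_add] at this
    rw [this]
    have hlt : m / 2 < m := by omega
    rw [PySem.List.pyGetD_natCast]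
    · exact (List.getD_eq_getElem _ _ hlt).trans (List.getD_eq_getElem _ _ hlt).symm
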